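-- pv_equiv track=rewrite | github.com/mattclarke/advent_of_code_18 | day_20/day_20.py | parse
-- ===== SOURCE A (Python) =====
-- def parse(data, index):
--     chunk = ""
--     while index < len(data):
--         c = data[index]
--         if c in ["N", "W", "S", "E"]:
--             chunk += c
--         elif c in ["(", ")", "|"]:
--             if len(chunk) > 0:
--                 return chunk, index
--             else:
--                 return c, index + 1
--         index += 1
--     return chunk, index
-- ===== SOURCE B (Python) =====
-- def parse(data, index):
--     # two-pass: find the terminator boundary first, then extract the chunk
--     j = index
--     while j < len(data) and data[j] not in "()|":
--         j += 1
--     chunk = "".join(c for c in data[index:j] if c in "NWSE")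
--     if j < len(data) and not chunk:
--         return data[j], j + 1
--     return chunk, j
-- ===== Notes on version B (the rewrite author's own statement) =====
-- stated objective: alternative
-- what changed: A's single fused loop (accumulate directions and branch on the terminator inside one pass) is replaced by a two-pass decomposition: first find the boundary j of the run, then extract the direction chunk from the slice data[index:j], then decide the return from j and the chunk.
-- outside the precondition, e.g. on parse('NN', -2): A returns ('NNNN', 2), B returns ('NN', 2); on parse('a', -5): A raises IndexError, B raises IndexError
import Mathlib
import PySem

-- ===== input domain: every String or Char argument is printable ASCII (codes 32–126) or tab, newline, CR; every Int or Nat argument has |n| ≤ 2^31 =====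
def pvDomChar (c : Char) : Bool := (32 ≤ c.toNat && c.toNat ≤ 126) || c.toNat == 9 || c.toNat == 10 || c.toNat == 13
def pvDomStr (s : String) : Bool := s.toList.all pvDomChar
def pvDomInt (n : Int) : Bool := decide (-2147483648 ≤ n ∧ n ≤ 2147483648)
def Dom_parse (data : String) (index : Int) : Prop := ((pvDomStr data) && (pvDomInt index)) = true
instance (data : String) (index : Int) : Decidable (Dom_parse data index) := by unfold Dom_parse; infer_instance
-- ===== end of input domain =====

-- B replaces A's fused accumulate-and-branch loop by a find-boundary-then-extract two-pass decomposition (objective: alternative; return value only).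

-- ===== PORT A =====
-- A's while loop: fuel counts the remaining iterations (len(data) - index).
def parseLoopA (s : List Char) (fuel : Nat) (index : Int) (chunk : List Char) : List Char × Int :=
  match fuel with
  | 0 => (chunk, index)
  | fuel + 1 =>
    match PySem.List.pyGet? s index with
    | none => (chunk, index)  -- IndexError in Python; unreachable under Pre_parse
    | some c =>
      if c = 'N' ∨ c = 'W' ∨ c = 'S' ∨ c = 'E' then
        parseLoopA s fuel (index + 1) (chunk ++ [c])
      else if c = '(' ∨ c = ')' ∨ c = '|' then
        if 0 < chunk.length then (chunk, index) else ([c], index + 1)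
      else
        parseLoopA s fuel (index + 1) chunk

def parse (data : String) (index : Int) : String × Int :=
  let s := data.toList
  let r := parseLoopA s (((s.length : Int) - index).toNat) index []
  (String.ofList r.1, r.2)

-- ===== PORT B =====
-- Pass 1 of B: scan j forward while data[j] is not a terminator.
def findBoundB (s : List Char) (fuel : Nat) (j : Int) : Int :=
  match fuel with
  | 0 => j
  | fuel + 1 =>
    match PySem.List.pyGet? s j with
    | none => j  -- IndexError in Python; unreachable under Pre_parse
    | some c =>
      if c = '(' ∨ c = ')' ∨ c = '|' then j else findBoundB s fuel (j + 1)

def parse_alt (data : String) (index : Int) : String × Int :=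
  let s := data.toList
  let j := findBoundB s (((s.length : Int) - index).toNat) index
  let chunk := (PySem.List.slice s (some index) (some j)).filter
    (fun c => c == 'N' || c == 'W' || c == 'S' || c == 'E')
  if j < (s.length : Int) ∧ chunk = [] then
    match PySem.List.pyGet? s j with
    | some c => (String.ofList [c], j + 1)
    | none => (String.ofList chunk, j)  -- unreachable: 0 ≤ index ≤ j < len
  else
    (String.ofList chunk, j)

-- ===== PRECONDITION & SPEC =====
-- Pre_ excludes negative start indices: there A either raises IndexError (index < -len(data)) or
-- silently re-reads the string via Python negative-index wraparound — an accidental corner no caller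
-- (the parser always passes a position ≥ 0) would specify, on which B's slice-based extraction
-- legitimately reads a different region.
def Pre_parse (data : String) (index : Int) : Prop := 0 ≤ index
instance (data : String) (index : Int) : Decidable (Pre_parse data index) := by unfold Pre_parse; infer_instance
def pvWitness_parse : String × Int := ("NN(W", 0)

def Spec_parse (data : String) (index : Int) (out : String × Int) : Prop := out = parse_alt data index
instance (data : String) (index : Int) (out : String × Int) : Decidable (Spec_parse data index out) := by unfold Spec_parse; infer_instance

-- ===== CLAIM (what is proved, stated in full; the proofs are below) =====
def Claim_equal_parse : Prop := ∀ (data : String) (index : Int), Dom_parse data index → Pre_parse data index → Spec_parse data index (parse data index)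

-- ===== LEMMAS AND PROOFS =====

-- What B computes from boundary j and the extracted chunk, with A's pending accumulator prepended.
def rhsB (s : List Char) (fuel : Nat) (i : Int) (chunk : List Char) : List Char × Int :=
  let j := findBoundB s fuel i
  let full := chunk ++ (PySem.List.slice s (some i) (some j)).filter
    (fun c => c == 'N' || c == 'W' || c == 'S' || c == 'E')
  if j < (s.length : Int) ∧ full = [] then
    match PySem.List.pyGet? s j with
    | some c => ([c], j + 1)
    | none => (full, j)
  else
    (full, j)

lemma le_findBoundB (s : List Char) (fuel : Nat) (j : Int) : j ≤ findBoundB s fuel j := by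
  induction fuel generalizing j with
  | zero => simp [findBoundB]
  | succ fuel ih =>
    simp only [findBoundB]
    cases PySem.List.pyGet? s j with
    | none => exact le_refl _
    | some c =>
      by_cases h : c = '(' ∨ c = ')' ∨ c = '|'
      · simp [h]
      · simp only [h, if_false]
        have := ih (j + 1)
        omega

lemma loopA_eq_rhsB (s : List Char) (fuel : Nat) (i : Nat) (chunk : List Char)
    (hf : fuel = s.length - i) :
    parseLoopA s fuel (i : Int) chunk = rhsB s fuel (i : Int) chunk := by
  induction fuel generalizing i chunk with
  | zero =>
    have hlen : s.length ≤ i := by omega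
    have hnotlt : ¬ ((i : Int) < (s.length : Int)) := by exact_mod_cast not_lt.mpr hlen
    simp [parseLoopA, rhsB, findBoundB, PySem.List.slice_natCast, hnotlt]
  | succ fuel ih =>
    have hi : i < s.length := by omega
    have hget : PySem.List.pyGet? s (i : Int) = some s[i] := by
      simp [hi]
    by_cases hterm : s[i] = '(' ∨ s[i] = ')' ∨ s[i] = '|'
    · -- terminator at i: both stop here
      have hnd : ¬ (s[i] = 'N' ∨ s[i] = 'W' ∨ s[i] = 'S' ∨ s[i] = 'E') := by
        rcases hterm with h | h | h <;> simp [h]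
      simp only [parseLoopA, rhsB, findBoundB, hget, hnd, hterm, if_true, if_false]
      have hilt : (i : Int) < (s.length : Int) := by exact_mod_cast hi
      simp [PySem.List.slice_natCast, hilt]
      by_cases hc : chunk = []
      · simp [hc]
      · have : 0 < chunk.length := List.length_pos_iff.mpr hc
        simp [hc, this]
    · -- not a terminator: both advance to i+1
      have hstep : findBoundB s (fuel + 1) (i : Int) = findBoundB s fuel ((i : Int) + 1) := by
        simp [findBoundB, hget, hterm]
      have hcast : ((i : Int) + 1) = ((i + 1 : Nat) : Int) := by push_cast; ring
      have hj1 : ((i + 1 : Nat) : Int) ≤ findBoundB s fuel ((i + 1 : Nat) : Int) := le_findBoundB ..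
      -- slice s i j = s[i] :: slice s (i+1) j for the common boundary j
      have hslice : ∀ j : Int, ((i : Int) + 1) ≤ j →
          PySem.List.slice s (some (i : Int)) (some j) =
            s[i] :: PySem.List.slice s (some ((i : Int) + 1)) (some j) := by
        intro j hij
        have h0i : (0 : Int) ≤ (i : Int) := by positivity
        have h0j : (0 : Int) ≤ j := by omega
        rw [PySem.List.slice_toNat s h0i h0j, PySem.List.slice_toNat s (by omega) h0j]
        have h1 : (i : Int).toNat = i := by omega
        have h2 : ((i : Int) + 1).toNat = i + 1 := by omega
        have h3 : i + 1 ≤ j.toNat := by omega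
        rw [h1, h2, List.drop_eq_getElem_cons hi]
        have h4 : j.toNat - i = (j.toNat - (i + 1)) + 1 := by omega
        rw [h4, List.take_succ_cons]
      by_cases hdir : s[i] = 'N' ∨ s[i] = 'W' ∨ s[i] = 'S' ∨ s[i] = 'E'
      · -- direction character: appended by A, kept by B's filter
        have hb : (s[i] == 'N' || s[i] == 'W' || s[i] == 'S' || s[i] == 'E') = true := by
          rcases hdir with h | h | h | h <;> simp [h]
        have hrec := ih (i + 1) (chunk ++ [s[i]]) (by omega)
        simp only [parseLoopA, hget, hdir, if_true]
        rw [hcast, hrec]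
        simp only [rhsB, hstep, hcast]
        rw [hslice _ (by rw [hcast]; exact hj1)]
        simp [hb]
      · -- other character: skipped by both
        have hb : (s[i] == 'N' || s[i] == 'W' || s[i] == 'S' || s[i] == 'E') = false := by
          simp only [Bool.or_eq_false_iff, beq_eq_false_iff_ne]
          refine ⟨⟨⟨?_, ?_⟩, ?_⟩, ?_⟩ <;> intro h <;> exact hdir (by simp [h])
        have hrec := ih (i + 1) chunk (by omega)
        simp only [parseLoopA, hget, hdir, hterm, if_false]
        rw [hcast, hrec]
        simp only [rhsB, hstep, hcast]
        rw [hslice _ (by rw [hcast]; exact hj1)]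
        simp [hb]

-- ===== VERDICT (by name: the statement is the Claim_ definition above) =====
theorem parse_spec : Claim_equal_parse := by
  intro data index _hdom hpre
  unfold Spec_parse parse parse_alt
  obtain ⟨i, rfl⟩ : ∃ i : Nat, index = (i : Int) := ⟨index.toNat, (Int.toNat_of_nonneg hpre).symm⟩
  have hfuel : (((data.toList.length : Int)) - (i : Int)).toNat = data.toList.length - i := by omega
  simp only [hfuel, loopA_eq_rhsB data.toList (data.toList.length - i) i [] rfl, rhsB,
    List.nil_append]
  split
  · cases PySem.List.pyGet? data.toList _ <;> rfl
  · rfl
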